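-- pv_equiv track=rewrite | github.com/QuangTran1608/vehicle_kinetic_sim | get_control_mpc.py | grab_lane_middle_point
-- ===== SOURCE A (Python) =====
-- def grab_lane_middle_point(array):
--     left_point = None
--     right_point = None
--     middle_point = None
--     for i in range(len(array)):
--         if array[i] > 0:
--             left_point = i
--             break
--
--     for i in range(len(array)-1, -1, -1):
--         if array[i] > 0:
--             right_point = i
--             break
--     if left_point and right_point:
--         middle_point = (right_point+left_point)//2
--     elif left_point:
--         middle_point = left_point
--     elif right_point:
--         middle_point = right_point
--     return middle_point
-- ===== SOURCE B (Python) =====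
-- def grab_lane_middle_point(array):
--     idx = [i for i, x in enumerate(array) if x > 0]
--     left_point = idx[0] if idx else None
--     right_point = idx[-1] if idx else None
--     if left_point and right_point:
--         return (right_point + left_point) // 2
--     elif left_point:
--         return left_point
--     elif right_point:
--         return right_point
--     return None
-- ===== Notes on version B (the rewrite author's own statement) =====
-- stated objective: simpler
-- what changed: Replaces A's two directional break-on-first-hit scans (forward and backward index loops) by one pass collecting all positive-value indices, taking its first and last elements; the final truthiness chain is kept verbatim.
import Mathlib
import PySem

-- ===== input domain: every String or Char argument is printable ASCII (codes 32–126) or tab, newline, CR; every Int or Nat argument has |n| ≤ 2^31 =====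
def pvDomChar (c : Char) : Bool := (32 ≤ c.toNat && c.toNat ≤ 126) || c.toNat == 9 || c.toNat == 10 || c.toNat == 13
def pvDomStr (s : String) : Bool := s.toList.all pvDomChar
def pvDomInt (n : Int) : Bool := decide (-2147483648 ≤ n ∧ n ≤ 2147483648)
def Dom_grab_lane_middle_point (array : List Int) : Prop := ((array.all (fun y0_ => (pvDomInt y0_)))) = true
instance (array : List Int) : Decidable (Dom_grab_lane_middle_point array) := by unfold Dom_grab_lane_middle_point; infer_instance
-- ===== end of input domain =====

-- B replaces A's two directional break-on-first-hit scans by one pass collecting the positive indices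
-- and taking its first/last element; return value only, objective: simpler.

-- Python truthiness of an Optional[int]: None and 0 are falsy
def pvTruthy (o : Option Int) : Bool :=
  match o with
  | none => false
  | some v => v != 0

-- ===== PORT A =====
-- first loop of A: forward scan, break at first positive (i is the running index)
def pvFirstLoop (l : List Int) (i : Int) : Option Int :=
  match l with
  | [] => none
  | x :: xs => if x > 0 then some i else pvFirstLoop xs (i + 1)

-- second loop of A: for i in range(len(array)-1, -1, -1), break at first positive;
-- k counts the indices still to visit, the current index is k-1 (always in range when started at len)
def pvLastLoop (array : List Int) : Nat → Option Int
  | 0 => none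
  | k + 1 => if array.getD k 0 > 0 then some (k : Int) else pvLastLoop array k

def grab_lane_middle_point (array : List Int) : Option Int :=
  let left_point := pvFirstLoop array 0
  let right_point := pvLastLoop array array.length
  if pvTruthy left_point && pvTruthy right_point then
    some (PySem.Int.floordiv (right_point.getD 0 + left_point.getD 0) 2)
  else if pvTruthy left_point then left_point
  else if pvTruthy right_point then right_point
  else none

-- ===== PORT B =====
def grab_lane_middle_point_alt (array : List Int) : Option Int :=
  let idx : List Int :=
    (PySem.List.enumerate array).filterMap (fun p => if p.2 > 0 then some p.1 else none)
  let left_point := idx.head?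
  let right_point := idx.getLast?
  if pvTruthy left_point && pvTruthy right_point then
    some (PySem.Int.floordiv (right_point.getD 0 + left_point.getD 0) 2)
  else if pvTruthy left_point then left_point
  else if pvTruthy right_point then right_point
  else none

-- ===== PRECONDITION & SPEC =====
def Spec_grab_lane_middle_point (array : List Int) (out : Option Int) : Prop := out = grab_lane_middle_point_alt array
instance (array : List Int) (out : Option Int) : Decidable (Spec_grab_lane_middle_point array out) := by unfold Spec_grab_lane_middle_point; infer_instance

-- ===== CLAIM (what is proved, stated in full; the proofs are below) =====
def Claim_equal_grab_lane_middle_point : Prop := ∀ (array : List Int), Dom_grab_lane_middle_point array → Spec_grab_lane_middle_point array (grab_lane_middle_point array)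

-- ===== LEMMAS AND PROOFS =====

-- the list of positive indices of l, enumerated from start s
def pvIdx (l : List Int) (s : Int) : List Int :=
  (PySem.List.enumerate l s).filterMap (fun p => if p.2 > 0 then some p.1 else none)

theorem pvIdx_nil (s : Int) : pvIdx [] s = [] := by
  simp [pvIdx, PySem.List.enumerate_nil]

theorem pvIdx_cons (x : Int) (xs : List Int) (s : Int) :
    pvIdx (x :: xs) s = (if x > 0 then [s] else []) ++ pvIdx xs (s + 1) := by
  by_cases h : x > 0 <;>
    simp [pvIdx, PySem.List.enumerate_cons, h]

theorem pvIdx_append (xs ys : List Int) (s : Int) :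
    pvIdx (xs ++ ys) s = pvIdx xs s ++ pvIdx ys (s + xs.length) := by
  induction xs generalizing s with
  | nil => simp [pvIdx_nil]
  | cons x xs ih =>
      simp [pvIdx_cons, ih, List.append_assoc]
      ring_nf

theorem pvFirstLoop_eq_head (l : List Int) (s : Int) :
    pvFirstLoop l s = (pvIdx l s).head? := by
  induction l generalizing s with
  | nil => simp [pvFirstLoop, pvIdx_nil]
  | cons x xs ih =>
      rw [pvIdx_cons]
      by_cases h : x > 0 <;> simp [pvFirstLoop, h, ih]

theorem pvLastLoop_eq_getLast (array : List Int) (k : Nat) (hk : k ≤ array.length) :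
    pvLastLoop array k = (pvIdx (array.take k) 0).getLast? := by
  induction k with
  | zero => simp [pvLastLoop, pvIdx_nil]
  | succ k ih =>
      have hklt : k < array.length := by omega
      have htake : array.take (k + 1) = array.take k ++ [array[k]] := by
        rw [List.take_add_one, List.getElem?_eq_getElem hklt]; rfl
      have hlen : (array.take k).length = k := by simp; omega
      have hgd : array.getD k 0 = array[k] := List.getD_eq_getElem _ _ hklt
      rw [pvLastLoop, htake, pvIdx_append, hlen, hgd]
      by_cases h : array[k] > 0
      · simp [h, pvIdx_cons, pvIdx_nil]
      · simp [h, pvIdx_cons, pvIdx_nil, ih (by omega)]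

-- ===== VERDICT (by name: the statement is the Claim_ definition above) =====
theorem grab_lane_middle_point_spec : Claim_equal_grab_lane_middle_point := by
  intro array _
  unfold Spec_grab_lane_middle_point grab_lane_middle_point grab_lane_middle_point_alt
  have h1 : pvFirstLoop array 0 = (pvIdx array 0).head? := pvFirstLoop_eq_head array 0
  have h2 : pvLastLoop array array.length = (pvIdx array 0).getLast? := by
    have := pvLastLoop_eq_getLast array array.length le_rfl
    simpa using this
  simp only [pvIdx] at h1 h2
  rw [h1, h2]
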